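-- pv_equiv track=rewrite | github.com/pyramid146/geo-mcp | geo_mcp/tools/epc.py | _flood_re_year_signal
-- ===== SOURCE A (Python) =====
-- def _flood_re_year_signal(age_band: str | None) -> str | None:
--     if not age_band or not age_band.strip():
--         return None
--     b = age_band.strip().upper()
--     if "BEFORE 1900" in b:
--         return "pre_2009"
--     # Well-defined pre-2009 bands
--     for pre in (
--         "1900-1929", "1930-1949", "1950-1966", "1967-1975", "1976-1982",
--         "1983-1990", "1991-1995", "1996-2002", "2003-2006",
--     ):
--         if pre in b:
--             return "pre_2009"
--     if "2012 ONWARDS" in b: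
--         return "post_2008"
--     if "2007 ONWARDS" in b or "2007-2011" in b:
--         return "spans_cutoff"
--     if "NO DATA" in b or "INVALID" in b:
--         return None
--     return None
-- ===== SOURCE B (Python) =====
-- # Different algorithm: one left-to-right scan over text positions collecting the SET of
-- # matched signals, then a separate priority-resolution pass (pre_2009 > post_2008 > spans_cutoff).
-- _TABLE = (
--     ("BEFORE 1900", "pre_2009"),
--     ("1900-1929", "pre_2009"), ("1930-1949", "pre_2009"), ("1950-1966", "pre_2009"),
--     ("1967-1975", "pre_2009"), ("1976-1982", "pre_2009"), ("1983-1990", "pre_2009"),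
--     ("1991-1995", "pre_2009"), ("1996-2002", "pre_2009"), ("2003-2006", "pre_2009"),
--     ("2012 ONWARDS", "post_2008"),
--     ("2007 ONWARDS", "spans_cutoff"), ("2007-2011", "spans_cutoff"),
-- )
--
-- def _flood_re_year_signal(age_band):
--     if not age_band or not age_band.strip():
--         return None
--     b = age_band.strip().upper()
--     found = set()
--     for i in range(len(b)):
--         for pat, sig in _TABLE:
--             if b[i:i + len(pat)] == pat:
--                 found.add(sig)
--     for sig in ("pre_2009", "post_2008", "spans_cutoff"):
--         if sig in found:
--             return sig
--     return None
-- ===== Notes on version B (the rewrite author's own statement) =====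
-- stated objective: alternative
-- what changed: Instead of testing each pattern with an early-returning substring search, B makes a single left-to-right scan over text positions collecting the set of signals whose pattern starts there, then resolves priority (pre_2009 > post_2008 > spans_cutoff) in a separate pass; correct because A's answer depends only on which signal groups occur, with that priority order.
import Mathlib
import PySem

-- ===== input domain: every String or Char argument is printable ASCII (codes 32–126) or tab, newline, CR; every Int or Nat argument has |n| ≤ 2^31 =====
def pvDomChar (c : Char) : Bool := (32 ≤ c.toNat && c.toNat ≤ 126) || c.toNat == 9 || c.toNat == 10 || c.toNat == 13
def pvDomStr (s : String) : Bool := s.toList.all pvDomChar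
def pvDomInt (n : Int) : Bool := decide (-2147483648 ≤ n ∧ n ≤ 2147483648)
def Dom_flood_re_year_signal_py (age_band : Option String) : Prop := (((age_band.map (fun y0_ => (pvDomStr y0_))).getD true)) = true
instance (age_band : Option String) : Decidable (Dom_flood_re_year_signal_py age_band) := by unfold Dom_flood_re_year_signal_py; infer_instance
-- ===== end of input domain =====

-- B scans text positions once collecting the set of matched signals, then resolves priority in a second pass (alternative algorithm, same cost).

-- ===== PORT A =====
-- the inner 'for pre in (...)' loop with its early return
def pvALoopPre (b : String) : List String → Option String
  | [] => none
  | pre :: rest => if PySem.Str.isIn pre b then some "pre_2009" else pvALoopPre b rest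

def flood_re_year_signal_py (age_band : Option String) : Option String :=
  match age_band with
  | none => none
  | some s =>
    if s = "" then none
    else if PySem.Str.strip s = "" then none
    else
      let b := PySem.Str.upper (PySem.Str.strip s)
      if PySem.Str.isIn "BEFORE 1900" b then some "pre_2009"
      else
        match pvALoopPre b ["1900-1929", "1930-1949", "1950-1966", "1967-1975", "1976-1982",
                            "1983-1990", "1991-1995", "1996-2002", "2003-2006"] with
        | some r => some r
        | none =>
          if PySem.Str.isIn "2012 ONWARDS" b then some "post_2008"
          else if PySem.Str.isIn "2007 ONWARDS" b || PySem.Str.isIn "2007-2011" b then some "spans_cutoff"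
          else if PySem.Str.isIn "NO DATA" b || PySem.Str.isIn "INVALID" b then none
          else none

-- ===== PORT B =====
def pvTable : List (String × String) :=
  [("BEFORE 1900", "pre_2009"),
   ("1900-1929", "pre_2009"), ("1930-1949", "pre_2009"), ("1950-1966", "pre_2009"),
   ("1967-1975", "pre_2009"), ("1976-1982", "pre_2009"), ("1983-1990", "pre_2009"),
   ("1991-1995", "pre_2009"), ("1996-2002", "pre_2009"), ("2003-2006", "pre_2009"),
   ("2012 ONWARDS", "post_2008"),
   ("2007 ONWARDS", "spans_cutoff"), ("2007-2011", "spans_cutoff")]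

-- the position scan: 'for i in range(len(b)): for pat, sig in _TABLE: if b[i:i+len(pat)] == pat: found.add(sig)'
def pvScan (b : String) : PySem.Set String :=
  (PySem.List.pyRange 0 (PySem.Str.len b) 1).foldl
    (fun acc i => pvTable.foldl
      (fun acc2 p =>
        if PySem.Str.slice b (some i) (some (i + PySem.Str.len p.1)) = p.1
        then PySem.Set.add acc2 p.2 else acc2)
      acc)
    PySem.Set.empty

def flood_re_year_signal_py_alt (age_band : Option String) : Option String :=
  match age_band with
  | none => none
  | some s =>
    if s = "" then none
    else if PySem.Str.strip s = "" then none
    else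
      let b := PySem.Str.upper (PySem.Str.strip s)
      let found := pvScan b
      -- 'for sig in (...): if sig in found: return sig' + final 'return None'
      ["pre_2009", "post_2008", "spans_cutoff"].find? (fun sig => PySem.Set.contains found sig)

-- ===== PRECONDITION & SPEC =====
def Spec_flood_re_year_signal_py (age_band : Option String) (out : Option String) : Prop := out = flood_re_year_signal_py_alt age_band
instance (age_band : Option String) (out : Option String) : Decidable (Spec_flood_re_year_signal_py age_band out) := by unfold Spec_flood_re_year_signal_py; infer_instance

-- ===== CLAIM (what is proved, stated in full; the proofs are below) =====
def Claim_equal_flood_re_year_signal_py : Prop := ∀ (age_band : Option String), Dom_flood_re_year_signal_py age_band → Spec_flood_re_year_signal_py age_band (flood_re_year_signal_py age_band)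

-- ===== LEMMAS AND PROOFS =====

-- membership in the inner (table) fold
theorem pvMemInner (b : String) (i : Int) (l : List (String × String)) (acc : PySem.Set String) (x : String) :
    x ∈ l.foldl
      (fun acc2 p =>
        if PySem.Str.slice b (some i) (some (i + PySem.Str.len p.1)) = p.1
        then PySem.Set.add acc2 p.2 else acc2) acc
    ↔ x ∈ acc ∨ ∃ p ∈ l, PySem.Str.slice b (some i) (some (i + PySem.Str.len p.1)) = p.1 ∧ x = p.2 := by
  induction l generalizing acc with
  | nil => simp
  | cons p rest ih =>
    simp only [List.foldl_cons]
    by_cases h : PySem.Str.slice b (some i) (some (i + PySem.Str.len p.1)) = p.1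
    · rw [if_pos h]
      simp only [ih, PySem.Set.mem_add, List.mem_cons]
      constructor
      · rintro (⟨hx | hx⟩ | ⟨q, hq, hm, hx⟩)
        · exact Or.inl hx
        · exact Or.inr ⟨p, Or.inl rfl, h, hx⟩
        · exact Or.inr ⟨q, Or.inr hq, hm, hx⟩
      · rintro (hx | ⟨q, hq | hq, hm, hx⟩)
        · exact Or.inl (Or.inl hx)
        · exact Or.inl (Or.inr (hq ▸ hx))
        · exact Or.inr ⟨q, hq, hm, hx⟩
    · rw [if_neg h]
      simp only [ih, List.mem_cons]
      constructor
      · rintro (hx | ⟨q, hq, hm, hx⟩)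
        · exact Or.inl hx
        · exact Or.inr ⟨q, Or.inr hq, hm, hx⟩
      · rintro (hx | ⟨q, hq | hq, hm, hx⟩)
        · exact Or.inl hx
        · exact absurd (hq ▸ hm) h
        · exact Or.inr ⟨q, hq, hm, hx⟩

-- membership in the outer (position) fold
theorem pvMemScan (b : String) (x : String) :
    x ∈ pvScan b
    ↔ ∃ i ∈ PySem.List.pyRange 0 (PySem.Str.len b) 1, ∃ p ∈ pvTable,
        PySem.Str.slice b (some i) (some (i + PySem.Str.len p.1)) = p.1 ∧ x = p.2 := by
  unfold pvScan
  generalize PySem.List.pyRange 0 (PySem.Str.len b) 1 = is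
  have : ∀ (is : List Int) (acc : PySem.Set String),
      x ∈ is.foldl (fun acc i => pvTable.foldl
        (fun acc2 p =>
          if PySem.Str.slice b (some i) (some (i + PySem.Str.len p.1)) = p.1
          then PySem.Set.add acc2 p.2 else acc2) acc) acc
      ↔ x ∈ acc ∨ ∃ i ∈ is, ∃ p ∈ pvTable,
          PySem.Str.slice b (some i) (some (i + PySem.Str.len p.1)) = p.1 ∧ x = p.2 := by
    intro is
    induction is with
    | nil => simp
    | cons i rest ih =>
      intro acc
      simp only [List.foldl_cons, ih, pvMemInner, List.mem_cons]
      constructor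
      · rintro ((hx | ⟨q, hq, hm, hx⟩) | ⟨j, hj, q, hq, hm, hx⟩)
        · exact Or.inl hx
        · exact Or.inr ⟨i, Or.inl rfl, q, hq, hm, hx⟩
        · exact Or.inr ⟨j, Or.inr hj, q, hq, hm, hx⟩
      · rintro (hx | ⟨j, hj | hj, q, hq, hm, hx⟩)
        · exact Or.inl (Or.inl hx)
        · exact Or.inl (Or.inr ⟨q, hq, hj ▸ hm, hx⟩)
        · exact Or.inr ⟨j, hj, q, hq, hm, hx⟩
  simpa [PySem.Set.empty] using this is PySem.Set.empty

-- a slice match at some scanned position is exactly a substring occurrence (patterns are nonempty)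
theorem pvOcc (b pat : String) (hne : pat.toList ≠ []) :
    (∃ i ∈ PySem.List.pyRange 0 (PySem.Str.len b) 1,
        PySem.Str.slice b (some i) (some (i + PySem.Str.len pat)) = pat)
    ↔ PySem.Str.isIn pat b = true := by
  constructor
  · rintro ⟨i, hi, hm⟩
    rw [PySem.List.mem_pyRange_one] at hi
    obtain ⟨h0, hlt⟩ := hi
    have hm' : PySem.List.slice b.toList (some i) (some (i + PySem.Str.len pat)) = pat.toList := by
      have := congrArg String.toList hm
      simpa using this
    rw [PySem.List.slice_toNat _ h0 (by simp [PySem.Str.len_eq]; omega)] at hm'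
    have hT : (i + PySem.Str.len pat).toNat - i.toNat = pat.toList.length := by
      rw [PySem.Str.len_eq] at *
      omega
    rw [hT] at hm'
    have hpre : pat.toList <+: b.toList.drop i.toNat := by
      rw [List.prefix_iff_eq_take]
      exact hm'.symm
    have : PySem.Chars.isIn pat.toList b.toList = true :=
      (PySem.Chars.exists_prefix_drop_iff_isIn _ _).mp ⟨i.toNat, hpre⟩
    simpa using this
  · intro hin
    obtain ⟨j, hpre⟩ := (PySem.Chars.exists_prefix_drop_iff_isIn pat.toList b.toList).mpr (by simpa using hin)
    have hj : j < b.toList.length := by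
      by_contra hge
      rw [List.drop_eq_nil_of_le (by omega)] at hpre
      exact hne (List.prefix_nil.mp hpre)
    refine ⟨(j : Int), ?_, ?_⟩
    · rw [PySem.List.mem_pyRange_one, PySem.Str.len_eq]
      omega
    · apply String.toList_inj.mp
      have : PySem.List.slice b.toList (some (j:Int)) (some ((j:Int) + (pat.toList.length : Int))) = pat.toList := by
        rw [PySem.List.slice_natCast_add]
        exact (List.prefix_iff_eq_take.mp hpre).symm
      simpa [PySem.Str.len_eq] using this

-- boolean characterisation of 'sig in found'
theorem pvContainsScan (b sig : String) :
    PySem.Set.contains (pvScan b) sig = true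
    ↔ ∃ p ∈ pvTable, PySem.Str.isIn p.1 b = true ∧ sig = p.2 := by
  rw [PySem.Set.contains_iff, pvMemScan]
  constructor
  · rintro ⟨i, hi, p, hp, hm, hx⟩
    refine ⟨p, hp, ?_, hx⟩
    have hne : p.1.toList ≠ [] := by
      fin_cases hp <;> simp
    exact (pvOcc b p.1 hne).1 ⟨i, hi, hm⟩
  · rintro ⟨p, hp, hin, hx⟩
    have hne : p.1.toList ≠ [] := by
      fin_cases hp <;> simp
    obtain ⟨i, hi, hm⟩ := (pvOcc b p.1 hne).2 hin
    exact ⟨i, hi, p, hp, hm, hx⟩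

-- boolean values of the three 'sig in found' tests
theorem pvC1 (b : String) : PySem.Set.contains (pvScan b) "pre_2009" = (PySem.Str.isIn "BEFORE 1900" b || PySem.Str.isIn "1900-1929" b || PySem.Str.isIn "1930-1949" b || PySem.Str.isIn "1950-1966" b || PySem.Str.isIn "1967-1975" b || PySem.Str.isIn "1976-1982" b || PySem.Str.isIn "1983-1990" b || PySem.Str.isIn "1991-1995" b || PySem.Str.isIn "1996-2002" b || PySem.Str.isIn "2003-2006" b) := by
  rw [Bool.eq_iff_iff, pvContainsScan]
  simp [pvTable]
  tauto

theorem pvC2 (b : String) : PySem.Set.contains (pvScan b) "post_2008" = PySem.Str.isIn "2012 ONWARDS" b := by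
  rw [Bool.eq_iff_iff, pvContainsScan]
  simp [pvTable]

theorem pvC3 (b : String) : PySem.Set.contains (pvScan b) "spans_cutoff" = (PySem.Str.isIn "2007 ONWARDS" b || PySem.Str.isIn "2007-2011" b) := by
  rw [Bool.eq_iff_iff, pvContainsScan]
  simp [pvTable]

-- the body equality for nonempty stripped input
theorem pvChain (b : String) :
    (if PySem.Str.isIn "BEFORE 1900" b then some "pre_2009"
     else match pvALoopPre b ["1900-1929", "1930-1949", "1950-1966", "1967-1975", "1976-1982",
                              "1983-1990", "1991-1995", "1996-2002", "2003-2006"] with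
     | some r => some r
     | none =>
       if PySem.Str.isIn "2012 ONWARDS" b then some "post_2008"
       else if PySem.Str.isIn "2007 ONWARDS" b || PySem.Str.isIn "2007-2011" b then some "spans_cutoff"
       else if PySem.Str.isIn "NO DATA" b || PySem.Str.isIn "INVALID" b then none
       else none)
    = ["pre_2009", "post_2008", "spans_cutoff"].find? (fun sig => PySem.Set.contains (pvScan b) sig) := by
  have hc1 := pvC1 b
  have hc2 := pvC2 b
  have hc3 := pvC3 b
  by_cases h1 : PySem.Str.isIn "BEFORE 1900" b = true
  · simp_all [List.find?]
  ·
    by_cases h2 : PySem.Str.isIn "1900-1929" b = true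
    · simp_all [pvALoopPre, List.find?]
    ·
      by_cases h3 : PySem.Str.isIn "1930-1949" b = true
      · simp_all [pvALoopPre, List.find?]
      ·
        by_cases h4 : PySem.Str.isIn "1950-1966" b = true
        · simp_all [pvALoopPre, List.find?]
        ·
          by_cases h5 : PySem.Str.isIn "1967-1975" b = true
          · simp_all [pvALoopPre, List.find?]
          ·
            by_cases h6 : PySem.Str.isIn "1976-1982" b = true
            · simp_all [pvALoopPre, List.find?]
            ·
              by_cases h7 : PySem.Str.isIn "1983-1990" b = true
              · simp_all [pvALoopPre, List.find?]
              ·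
                by_cases h8 : PySem.Str.isIn "1991-1995" b = true
                · simp_all [pvALoopPre, List.find?]
                ·
                  by_cases h9 : PySem.Str.isIn "1996-2002" b = true
                  · simp_all [pvALoopPre, List.find?]
                  ·
                    by_cases h10 : PySem.Str.isIn "2003-2006" b = true
                    · simp_all [pvALoopPre, List.find?]
                    ·
                      by_cases h11 : PySem.Str.isIn "2012 ONWARDS" b = true
                      · simp_all [pvALoopPre, List.find?]
                      ·
                        by_cases h12 : PySem.Str.isIn "2007 ONWARDS" b = true
                        · simp_all [pvALoopPre, List.find?]
                        ·
                          by_cases h13 : PySem.Str.isIn "2007-2011" b = true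
                          · simp_all [pvALoopPre, List.find?]
                          · simp_all [pvALoopPre, List.find?]

-- ===== VERDICT (by name: the statement is the Claim_ definition above) =====
theorem flood_re_year_signal_py_spec : Claim_equal_flood_re_year_signal_py := by
  intro age_band _
  unfold Spec_flood_re_year_signal_py flood_re_year_signal_py flood_re_year_signal_py_alt
  cases age_band with
  | none => rfl
  | some s =>
    dsimp only
    by_cases he : s = ""
    · rw [if_pos he, if_pos he]
    · rw [if_neg he, if_neg he]
      by_cases hs : PySem.Str.strip s = ""
      · rw [if_pos hs, if_pos hs]
      · rw [if_neg hs, if_neg hs]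
        exact pvChain (PySem.Str.upper (PySem.Str.strip s))
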